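-- pv_equiv track=rewrite | github.com/varunuppala/searchEngine | PART-2/querydynamic.py | checkRelevancy
-- ===== SOURCE A (Python) =====
-- def checkRelevancy(listt):
--     if len(listt) == 1:
--         return True
--     else:
--         for i in listt[0]:
--             for j in listt[1]:
--                 if (i-j)*(i-j) < 25:
--                     return True
--     return False
-- ===== SOURCE B (Python) =====
-- def checkRelevancy(listt):
--     if len(listt) == 1:
--         return True
--     xs = sorted(listt[0])
--     ys = sorted(listt[1])
--     i = 0
--     j = 0
--     while i < len(xs) and j < len(ys):
--         d = xs[i] - ys[j]
--         if d * d < 25: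
--             return True
--         if xs[i] < ys[j]:
--             i += 1
--         else:
--             j += 1
--     return False
-- ===== Notes on version B (the rewrite author's own statement) =====
-- stated objective: alternative
-- what changed: Replaces the nested all-pairs scan over the first two lists by sorting both lists and a two-pointer sweep that advances whichever pointer holds the smaller value.
import Mathlib
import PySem

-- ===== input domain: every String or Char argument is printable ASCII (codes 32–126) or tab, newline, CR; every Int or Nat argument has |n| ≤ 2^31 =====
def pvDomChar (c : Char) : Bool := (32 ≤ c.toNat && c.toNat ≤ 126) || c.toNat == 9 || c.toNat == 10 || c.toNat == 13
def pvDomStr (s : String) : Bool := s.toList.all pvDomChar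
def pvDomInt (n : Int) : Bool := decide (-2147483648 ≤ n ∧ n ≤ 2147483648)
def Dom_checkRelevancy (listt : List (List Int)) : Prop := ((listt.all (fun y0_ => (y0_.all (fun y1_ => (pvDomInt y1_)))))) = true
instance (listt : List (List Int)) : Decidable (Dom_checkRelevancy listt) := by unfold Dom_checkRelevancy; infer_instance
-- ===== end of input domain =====

-- B replaces A's nested all-pairs scan over the first two lists by sorting both
-- lists and a two-pointer sweep (objective: alternative algorithm).

-- ===== PORT A =====
-- A: if len(listt)==1 return True; else nested for-loops over listt[0] and listt[1].
def checkRelevancy (listt : List (List Int)) : Bool :=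
  if listt.length == 1 then true
  else
    match PySem.List.pyGet? listt 0, PySem.List.pyGet? listt 1 with
    | some a, some b => a.any (fun i => b.any (fun j => (i - j) * (i - j) < 25))
    | _, _ => false  -- unreachable under Pre_ (listt ≠ []): Python raises IndexError

-- ===== PORT B =====
-- the while loop of Source B: advance whichever pointer holds the smaller value
def pvSweep : List Int → List Int → Bool
  | x :: xs, y :: ys =>
    if (x - y) * (x - y) < 25 then true
    else if x < y then pvSweep xs (y :: ys)
    else pvSweep (x :: xs) ys
  | _, _ => false

def checkRelevancy_alt (listt : List (List Int)) : Bool :=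
  if listt.length == 1 then true
  else
    match PySem.List.pyGet? listt 0 with
    | none => false  -- unreachable under Pre_
    | some a =>
      match PySem.List.pyGet? listt 1 with
      | none => false
      | some b =>
          pvSweep (PySem.List.sorted a (fun x => x) false) (PySem.List.sorted b (fun x => x) false)

-- ===== PRECONDITION & SPEC =====
-- Pre_ excludes the empty list, on which A raises IndexError (listt[0]).
def Pre_checkRelevancy (listt : List (List Int)) : Prop := listt ≠ []
instance (listt : List (List Int)) : Decidable (Pre_checkRelevancy listt) := by unfold Pre_checkRelevancy; infer_instance
def pvWitness_checkRelevancy : List (List Int) := [[1, 10], [6, 100]]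

def Spec_checkRelevancy (listt : List (List Int)) (out : Bool) : Prop := out = checkRelevancy_alt listt
instance (listt : List (List Int)) (out : Bool) : Decidable (Spec_checkRelevancy listt out) := by unfold Spec_checkRelevancy; infer_instance

-- ===== CLAIM (what is proved, stated in full; the proofs are below) =====
def Claim_equal_checkRelevancy : Prop := ∀ (listt : List (List Int)), Dom_checkRelevancy listt → Pre_checkRelevancy listt → Spec_checkRelevancy listt (checkRelevancy listt)

-- ===== LEMMAS AND PROOFS =====

theorem pvSq_lt (d : Int) : (d * d < 25) ↔ (-5 < d ∧ d < 5) := by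
  constructor
  · intro h
    constructor <;> by_contra hc <;> push_neg at hc <;> nlinarith
  · rintro ⟨h1, h2⟩; nlinarith

-- the sweep decides existence of a close pair on sorted lists
theorem pvSweep_spec : ∀ (xs ys : List Int),
    xs.Pairwise (· ≤ ·) → ys.Pairwise (· ≤ ·) →
    (pvSweep xs ys = true ↔ ∃ x ∈ xs, ∃ y ∈ ys, ((x - y) * (x - y) < 25 : Bool) = true)
  | [], ys, _, _ => by simp [pvSweep]
  | x :: xs, [], _, _ => by simp [pvSweep]
  | x :: xs, y :: ys, hx, hy => by
    rw [pvSweep]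
    by_cases hclose : (x - y) * (x - y) < 25
    · simp only [hclose, if_true]
      constructor
      · intro _
        exact ⟨x, by simp, y, by simp, by simpa using hclose⟩
      · intro _; trivial
    · simp only [hclose, if_false]
      have hx' := (List.pairwise_cons.mp hx).2
      have hy' := (List.pairwise_cons.mp hy).2
      by_cases hlt : x < y
      · simp only [hlt, if_true]
        rw [pvSweep_spec xs (y :: ys) hx' hy]
        -- x is more than 4 below y, hence below every element of y :: ys
        have hfar : ∀ y' ∈ y :: ys, ¬ ((x - y') * (x - y') < 25) := by
          intro y' hy'' h
          have hyy : y ≤ y' := by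
            rcases List.mem_cons.mp hy'' with h' | h'
            · omega
            · exact (List.pairwise_cons.mp hy).1 y' h'
          have h5 : x - y ≤ -5 := by
            by_contra hc; push_neg at hc
            exact hclose ((pvSq_lt _).mpr ⟨by omega, by omega⟩)
          rcases (pvSq_lt _).mp h with ⟨h1, h2⟩
          omega
        constructor
        · rintro ⟨x', hx'', y', hy'', h⟩
          exact ⟨x', List.mem_cons_of_mem _ hx'', y', hy'', h⟩
        · rintro ⟨x', hx'', y', hy'', h⟩
          rcases List.mem_cons.mp hx'' with h' | h'
          · subst h'; exact absurd (by simpa using h) (hfar y' hy'')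
          · exact ⟨x', h', y', hy'', h⟩
      · simp only [hlt, if_false]
        rw [pvSweep_spec (x :: xs) ys hx hy']
        have hfar : ∀ x' ∈ x :: xs, ¬ ((x' - y) * (x' - y) < 25) := by
          intro x' hx'' h
          have hxx : x ≤ x' := by
            rcases List.mem_cons.mp hx'' with h' | h'
            · omega
            · exact (List.pairwise_cons.mp hx).1 x' h'
          have h5 : x - y ≥ 5 := by
            by_contra hc; push_neg at hc
            exact hclose ((pvSq_lt _).mpr ⟨by omega, by omega⟩)
          rcases (pvSq_lt _).mp h with ⟨h1, h2⟩
          omega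
        constructor
        · rintro ⟨x', hx'', y', hy'', h⟩
          exact ⟨x', hx'', y', List.mem_cons_of_mem _ hy'', h⟩
        · rintro ⟨x', hx'', y', hy'', h⟩
          rcases List.mem_cons.mp hy'' with h' | h'
          · subst h'; exact absurd (by simpa using h) (hfar x' hx'')
          · exact ⟨x', hx'', y', h', h⟩
  termination_by xs ys => xs.length + ys.length

theorem pvSweep_eq_any (a b : List Int) :
    pvSweep (PySem.List.sorted a (fun x => x) false) (PySem.List.sorted b (fun x => x) false)
      = a.any (fun i => b.any (fun j => (i - j) * (i - j) < 25)) := by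
  have hs := pvSweep_spec (PySem.List.sorted a (fun x => x) false)
      (PySem.List.sorted b (fun x => x) false)
      (by simpa using PySem.List.sorted_pairwise a (fun x => x))
      (by simpa using PySem.List.sorted_pairwise b (fun x => x))
  rw [Bool.eq_iff_iff, hs]
  simp [List.any_eq_true, PySem.List.mem_sorted]

-- ===== VERDICT (by name: the statement is the Claim_ definition above) =====
theorem checkRelevancy_spec : Claim_equal_checkRelevancy := by
  intro listt _ hpre
  unfold Spec_checkRelevancy checkRelevancy checkRelevancy_alt
  by_cases h1 : listt.length == 1
  · simp [h1]
  · simp only [h1, if_false]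
    match listt, hpre with
    | [a], _ => simp at h1
    | a :: b :: rest, _ =>
      have hg0 : PySem.List.pyGet? (a :: b :: rest) 0 = some a := by
        simpa using PySem.List.pyGet?_natCast (a :: b :: rest) 0
      have hg1 : PySem.List.pyGet? (a :: b :: rest) 1 = some b := by
        simpa using PySem.List.pyGet?_natCast (a :: b :: rest) 1
      rw [hg0, hg1]
      exact (pvSweep_eq_any a b).symm
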